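-- pv_equiv track=rewrite | github.com/Mirard/pythonProject | Lesson4/homework4/task6.py | regen_list
-- ===== SOURCE A (Python) =====
-- import itertools
--
-- def regen_list(user_list):
--     new_list = []
--     index = 0
--     for el in itertools.cycle(user_list):
--         if index > 30:
--             break
--         new_list.append(el)
--         index = index + 1
--     return new_list
-- ===== SOURCE B (Python) =====
-- def regen_list(user_list):
--     if not user_list:
--         return []
--     q, r = divmod(31, len(user_list))
--     return user_list * q + user_list[:r]
-- ===== Notes on version B (the rewrite author's own statement) =====
-- stated objective: simpler
-- what changed: Replaces the itertools.cycle stream with a break counter by a closed-form construction: divmod(31, len) gives full copies plus a prefix slice (empty list guarded).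
import Mathlib
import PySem

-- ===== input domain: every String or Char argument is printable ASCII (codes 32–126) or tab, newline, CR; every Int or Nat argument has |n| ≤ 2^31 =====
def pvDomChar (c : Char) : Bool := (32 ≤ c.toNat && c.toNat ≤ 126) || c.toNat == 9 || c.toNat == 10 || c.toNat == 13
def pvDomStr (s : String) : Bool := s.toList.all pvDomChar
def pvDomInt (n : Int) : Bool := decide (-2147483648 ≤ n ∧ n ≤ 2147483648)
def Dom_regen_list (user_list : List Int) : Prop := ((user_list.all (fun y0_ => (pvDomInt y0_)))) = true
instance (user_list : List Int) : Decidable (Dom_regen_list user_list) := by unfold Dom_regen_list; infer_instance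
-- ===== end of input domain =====

-- B replaces the itertools.cycle stream + break counter by a closed-form divmod construction (simpler).

-- ===== PORT A =====
-- Loop over itertools.cycle(user_list), appending until index > 30: modelled with
-- remaining fuel 31 - index and the current tail of the cycled source; when the tail
-- is exhausted the cycle restarts from the source (empty source: cycle is empty, loop ends).
def regenLoopA (src : List Int) : Nat → List Int → List Int
  | 0, _ => []
  | n + 1, [] =>
    match src with
    | [] => []
    | x :: xs => x :: regenLoopA src n xs
  | n + 1, x :: xs => x :: regenLoopA src n xs

def regen_list (user_list : List Int) : List Int :=
  regenLoopA user_list 31 user_list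

-- ===== PORT B =====
def regen_list_alt (user_list : List Int) : List Int :=
  if user_list = [] then []
  else
    let q := 31 / user_list.length
    let r := 31 % user_list.length
    (List.replicate q user_list).flatten ++ user_list.take r

-- ===== PRECONDITION & SPEC =====
def Spec_regen_list (user_list : List Int) (out : List Int) : Prop := out = regen_list_alt user_list
instance (user_list : List Int) (out : List Int) : Decidable (Spec_regen_list user_list out) := by unfold Spec_regen_list; infer_instance

-- ===== CLAIM (what is proved, stated in full; the proofs are below) =====
def Claim_equal_regen_list : Prop := ∀ (user_list : List Int), Dom_regen_list user_list → Spec_regen_list user_list (regen_list user_list)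

-- ===== LEMMAS AND PROOFS =====

-- The loop takes the first n elements of cur followed by the infinite cycle of src.
theorem regenLoopA_take (src : List Int) (hsrc : src ≠ []) :
    ∀ (n : Nat) (cur : List Int),
      regenLoopA src n cur = List.take n (cur ++ (List.replicate n src).flatten) := by
  obtain ⟨x, xs, rfl⟩ : ∃ x xs, src = x :: xs := by
    cases src with
    | nil => exact absurd rfl hsrc
    | cons a l => exact ⟨a, l, rfl⟩
  intro n
  induction n with
  | zero => intro cur; simp [regenLoopA]
  | succ n ih =>
    intro cur
    match cur with
    | [] =>
      simp only [regenLoopA, List.nil_append, List.replicate_succ, List.flatten_cons,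
        List.cons_append, List.take_succ_cons, List.cons.injEq, true_and]
      rw [ih xs]
    | y :: ys =>
      simp only [regenLoopA, List.cons_append, List.take_succ_cons, List.cons.injEq, true_and]
      rw [ih ys]
      have hle : n ≤ (ys ++ (List.replicate n (x :: xs)).flatten).length := by
        rw [List.length_append, List.length_flatten]
        simp only [List.map_replicate, List.sum_replicate, smul_eq_mul]
        calc n = n * 1 := (Nat.mul_one n).symm
          _ ≤ n * (x :: xs).length := Nat.mul_le_mul_left n (by simp)
          _ ≤ ys.length + n * (x :: xs).length := Nat.le_add_left _ _
      conv_rhs => rw [List.replicate_succ' (n := n), List.flatten_append,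
        ← List.append_assoc, List.take_append_of_le_length hle]

-- take (q*len + r) of enough copies of l is q full copies plus a prefix of length r.
theorem take_flatten_replicate (l : List Int) :
    ∀ (q r m : Nat), r < l.length → q + 1 ≤ m →
      List.take (q * l.length + r) (List.replicate m l).flatten
        = (List.replicate q l).flatten ++ List.take r l := by
  intro q
  induction q with
  | zero =>
    intro r m hr hm
    match m, hm with
    | m + 1, _ =>
      simp only [List.replicate_succ, List.flatten_cons, Nat.zero_mul, Nat.zero_add,
        List.replicate_zero, List.flatten_nil, List.nil_append]
      rw [List.take_append_of_le_length (le_of_lt hr)]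
  | succ q ih =>
    intro r m hr hm
    match m, hm with
    | m + 1, hm =>
      simp only [List.replicate_succ, List.flatten_cons]
      have hlen : (q + 1) * l.length + r = l.length + (q * l.length + r) := by ring
      rw [hlen, List.take_append, List.take_of_length_le (Nat.le_add_right _ _),
        Nat.add_sub_cancel_left]
      rw [ih r m hr (by omega)]
      simp

-- ===== VERDICT (by name: the statement is the Claim_ definition above) =====
theorem regen_list_spec : Claim_equal_regen_list := by
  intro l _
  unfold Spec_regen_list regen_list regen_list_alt
  by_cases hl : l = []
  · subst hl; decide
  · simp only [hl, if_false]
    have h1 : 1 ≤ l.length := by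
      cases l with
      | nil => exact absurd rfl hl
      | cons a t => simp
    rw [regenLoopA_take l hl 31 l]
    have hcons : l ++ (List.replicate 31 l).flatten = (List.replicate 32 l).flatten := by
      simp [List.replicate_succ]
    rw [hcons]
    have hr : 31 % l.length < l.length := Nat.mod_lt _ (by omega)
    have hq : 31 / l.length + 1 ≤ 32 := by
      have := Nat.div_le_self 31 l.length
      omega
    have hdm : 31 / l.length * l.length + 31 % l.length = 31 := by
      have h := Nat.div_add_mod 31 l.length
      rw [Nat.mul_comm] at h
      omega
    calc List.take 31 (List.replicate 32 l).flatten
        = List.take (31 / l.length * l.length + 31 % l.length) (List.replicate 32 l).flatten := by rw [hdm]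
      _ = (List.replicate (31 / l.length) l).flatten ++ List.take (31 % l.length) l :=
          take_flatten_replicate l _ _ 32 hr hq
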